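-- pv_equiv track=rewrite | github.com/JamesAC42/nasfaqv2 | brokerbot/training/scraper.py | _trim_chain_ids_to_char_budget
-- ===== SOURCE A (Python) =====
-- def _trim_chain_ids_to_char_budget(chain_ids, posts_by_id, max_total_chars):
--     """
--     Trim from the OLDEST end until total chars <= budget.
--     This preserves the "user/assistant" alternation starting at index 0 after formatting.
--     """
--     if not chain_ids:
--         return chain_ids
--     total = sum(len((posts_by_id[pid].get("text") or "")) for pid in chain_ids if pid in posts_by_id)
--     if total <= max_total_chars:
--         return chain_ids
--     trimmed = list(chain_ids)
--     while len(trimmed) > 2 and total > max_total_chars: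
--         removed_id = trimmed.pop(0)
--         total -= len((posts_by_id.get(removed_id, {}).get("text") or ""))
--     return trimmed
-- ===== SOURCE B (Python) =====
-- def _trim_chain_ids_to_char_budget(chain_ids, posts_by_id, max_total_chars):
--     n = len(chain_ids)
--     if n == 0:
--         return chain_ids
--     # one reverse pass: keep the longest suffix whose char total fits the budget
--     kept = 0
--     running = 0
--     for pid in reversed(chain_ids):
--         post = posts_by_id.get(pid)
--         running += len(post.get("text") or "") if post is not None else 0
--         if running > max_total_chars:
--             break
--         kept += 1
--     kept = max(kept, min(2, n))
--     if kept == n: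
--         return chain_ids
--     return chain_ids[n - kept:]
-- ===== Notes on version B (the rewrite author's own statement) =====
-- stated objective: alternative
-- what changed: Instead of summing all lengths and then popping ids off the front one by one while over budget, B makes a single reverse scan that accumulates lengths and keeps the longest budget-fitting suffix (with the min-2 floor), then slices once.
import Mathlib
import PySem

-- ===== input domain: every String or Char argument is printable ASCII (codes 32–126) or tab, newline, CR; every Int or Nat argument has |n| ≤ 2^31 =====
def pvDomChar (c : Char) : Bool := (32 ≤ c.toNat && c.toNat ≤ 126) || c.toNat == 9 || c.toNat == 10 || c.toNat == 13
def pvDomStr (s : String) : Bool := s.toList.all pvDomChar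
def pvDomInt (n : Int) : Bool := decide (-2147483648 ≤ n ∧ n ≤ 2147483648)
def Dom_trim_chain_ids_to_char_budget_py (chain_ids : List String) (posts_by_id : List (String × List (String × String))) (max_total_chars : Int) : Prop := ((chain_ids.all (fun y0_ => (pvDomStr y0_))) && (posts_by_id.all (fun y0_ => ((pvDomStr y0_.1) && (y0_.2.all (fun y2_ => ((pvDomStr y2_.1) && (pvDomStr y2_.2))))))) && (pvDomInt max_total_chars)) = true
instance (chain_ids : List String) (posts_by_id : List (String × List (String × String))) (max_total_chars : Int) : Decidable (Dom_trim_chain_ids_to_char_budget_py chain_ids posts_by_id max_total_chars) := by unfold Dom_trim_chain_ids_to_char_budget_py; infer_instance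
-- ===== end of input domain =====

-- B replaces A's "sum everything, then pop from the front" with a single reverse scan that
-- keeps the longest budget-fitting suffix (min 2 kept); objective: alternative decomposition.
-- When no trimming happens A returns the chain_ids object itself while B also returns it;
-- equivalence here is about the return value.

-- ===== PORT A =====
-- shared length helper: len(posts_by_id.get(pid, {}).get("text") or "") — 'or ""' turns
-- a missing value (None) into ""; for string values len(v or "") = len(v), so getD "" is exact
def pvSize (posts_by_id : List (String × List (String × String))) (pid : String) : Int :=
  PySem.Str.len ((PySem.Dict.get? (PySem.Dict.mk ((PySem.Dict.get? (PySem.Dict.mk posts_by_id) pid).getD [])) "text").getD "")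

-- while len(trimmed) > 2 and total > max_total_chars: removed = trimmed.pop(0); total -= len(...)
def pvPopLoopA (posts_by_id : List (String × List (String × String))) (max_total_chars : Int) : List String → Int → List String
  | [], _ => []
  | [a], _ => [a]
  | [a, b], _ => [a, b]
  | x :: rest, total =>        -- here len > 2
      if max_total_chars < total then
        pvPopLoopA posts_by_id max_total_chars rest (total - pvSize posts_by_id x)
      else x :: rest

def trim_chain_ids_to_char_budget_py (chain_ids : List String) (posts_by_id : List (String × List (String × String))) (max_total_chars : Int) : List String :=
  if chain_ids = [] then chain_ids
  else
    -- sum(len(posts_by_id[pid].get("text") or "") for pid in chain_ids if pid in posts_by_id)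
    -- (inside the membership guard, posts_by_id[pid] = posts_by_id.get(pid, {}), so pvSize is exact)
    let total := chain_ids.foldl
      (fun acc pid => if (PySem.Dict.mk posts_by_id).contains pid then acc + pvSize posts_by_id pid else acc) 0
    if total ≤ max_total_chars then chain_ids
    else pvPopLoopA posts_by_id max_total_chars chain_ids total

-- ===== PORT B =====
-- the 'for pid in reversed(chain_ids): running += size; if running > budget: break; kept += 1' loop
def pvGreedyB (posts_by_id : List (String × List (String × String))) (max_total_chars : Int) : List String → Int → Nat
  | [], _ => 0
  | pid :: rest, running =>
      let r := running + pvSize posts_by_id pid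
      if max_total_chars < r then 0
      else 1 + pvGreedyB posts_by_id max_total_chars rest r

def trim_chain_ids_to_char_budget_py_alt (chain_ids : List String) (posts_by_id : List (String × List (String × String))) (max_total_chars : Int) : List String :=
  let n := chain_ids.length
  if n = 0 then chain_ids
  else
    let kept := pvGreedyB posts_by_id max_total_chars chain_ids.reverse 0
    let kept := max kept (min 2 n)
    if kept = n then chain_ids
    else chain_ids.drop (n - kept)   -- chain_ids[n - kept:] with 0 ≤ n - kept ≤ n: drop is exact

-- ===== PRECONDITION & SPEC =====
def Spec_trim_chain_ids_to_char_budget_py (chain_ids : List String) (posts_by_id : List (String × List (String × String))) (max_total_chars : Int) (out : List String) : Prop := out = trim_chain_ids_to_char_budget_py_alt chain_ids posts_by_id max_total_chars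
instance (chain_ids : List String) (posts_by_id : List (String × List (String × String))) (max_total_chars : Int) (out : List String) : Decidable (Spec_trim_chain_ids_to_char_budget_py chain_ids posts_by_id max_total_chars out) := by unfold Spec_trim_chain_ids_to_char_budget_py; infer_instance

-- ===== CLAIM (what is proved, stated in full; the proofs are below) =====
def Claim_equal_trim_chain_ids_to_char_budget_py : Prop := ∀ (chain_ids : List String) (posts_by_id : List (String × List (String × String))) (max_total_chars : Int), Dom_trim_chain_ids_to_char_budget_py chain_ids posts_by_id max_total_chars → Spec_trim_chain_ids_to_char_budget_py chain_ids posts_by_id max_total_chars (trim_chain_ids_to_char_budget_py chain_ids posts_by_id max_total_chars)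

-- ===== LEMMAS AND PROOFS =====

-- total char length of a list of ids
def pvS (posts_by_id : List (String × List (String × String))) (l : List String) : Int :=
  (l.map (pvSize posts_by_id)).sum

theorem pvSize_nonneg (posts_by_id : List (String × List (String × String))) (pid : String) :
    0 ≤ pvSize posts_by_id pid := by
  simp [pvSize, PySem.Str.len_eq]

theorem pvS_nonneg (posts_by_id : List (String × List (String × String))) (l : List String) :
    0 ≤ pvS posts_by_id l := by
  induction l with
  | nil => simp [pvS]
  | cons x t ih =>
    simp only [pvS, List.map_cons, List.sum_cons]
    have := pvSize_nonneg posts_by_id x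
    simp only [pvS] at ih
    omega

theorem pvS_reverse (posts_by_id : List (String × List (String × String))) (l : List String) :
    pvS posts_by_id l.reverse = pvS posts_by_id l := by
  simp [pvS, List.map_reverse]

theorem pvS_cons (posts_by_id : List (String × List (String × String))) (x : String) (l : List String) :
    pvS posts_by_id (x :: l) = pvSize posts_by_id x + pvS posts_by_id l := by
  simp [pvS]

theorem pvSize_of_not_contains (posts_by_id : List (String × List (String × String))) (pid : String)
    (h : (PySem.Dict.mk posts_by_id).contains pid = false) : pvSize posts_by_id pid = 0 := by
  have hg : PySem.Dict.get? (PySem.Dict.mk posts_by_id) pid = none := by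
    have hc := PySem.Dict.contains_eq_isSome_get? (d := PySem.Dict.mk posts_by_id) (k := pid)
    rw [h] at hc
    cases hq : PySem.Dict.get? (PySem.Dict.mk posts_by_id) pid with
    | none => rfl
    | some v => rw [hq] at hc; simp at hc
  unfold pvSize
  rw [hg]
  simp [PySem.Dict.get?, PySem.Str.len_eq]

theorem pvTotal_eq (posts_by_id : List (String × List (String × String))) (l : List String) (c : Int) :
    l.foldl (fun acc pid => if (PySem.Dict.mk posts_by_id).contains pid then acc + pvSize posts_by_id pid else acc) c
      = c + pvS posts_by_id l := by
  induction l generalizing c with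
  | nil => simp [pvS]
  | cons x t ih =>
    simp only [List.foldl_cons]
    cases hc : (PySem.Dict.mk posts_by_id).contains x with
    | true =>
      rw [if_pos rfl, ih, pvS_cons]; ring
    | false =>
      rw [if_neg (by simp), ih, pvS_cons,
        pvSize_of_not_contains posts_by_id x hc]
      ring

theorem pvGreedy_le (posts_by_id : List (String × List (String × String))) (b : Int)
    (l : List String) (r : Int) : pvGreedyB posts_by_id b l r ≤ l.length := by
  induction l generalizing r with
  | nil => simp [pvGreedyB]
  | cons x t ih =>
    simp only [pvGreedyB, List.length_cons]
    split
    · omega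
    · have := ih (r + pvSize posts_by_id x); omega

theorem pvGreedy_all (posts_by_id : List (String × List (String × String))) (b : Int)
    (l : List String) (r : Int) (h : r + pvS posts_by_id l ≤ b) :
    pvGreedyB posts_by_id b l r = l.length := by
  induction l generalizing r with
  | nil => simp [pvGreedyB]
  | cons x t ih =>
    rw [pvS_cons] at h
    have hS : 0 ≤ pvS posts_by_id t := pvS_nonneg posts_by_id t
    have hx : 0 ≤ pvSize posts_by_id x := pvSize_nonneg posts_by_id x
    simp only [pvGreedyB, List.length_cons]
    rw [if_neg (by omega)]
    rw [ih (r + pvSize posts_by_id x) (by omega)]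
    omega

theorem pvGreedy_append_lt (posts_by_id : List (String × List (String × String))) (b : Int)
    (l l2 : List String) (r : Int) (h : pvGreedyB posts_by_id b l r < l.length) :
    pvGreedyB posts_by_id b (l ++ l2) r = pvGreedyB posts_by_id b l r := by
  induction l generalizing r with
  | nil => simp at h
  | cons x t ih =>
    simp only [pvGreedyB, List.length_cons, List.cons_append] at h ⊢
    split
    · rfl
    · rename_i hb
      rw [if_neg hb] at h
      rw [ih (r + pvSize posts_by_id x) (by omega)]

theorem pvGreedy_append_full (posts_by_id : List (String × List (String × String))) (b : Int)
    (l l2 : List String) (r : Int) (h : pvGreedyB posts_by_id b l r = l.length) :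
    pvGreedyB posts_by_id b (l ++ l2) r
      = l.length + pvGreedyB posts_by_id b l2 (r + pvS posts_by_id l) := by
  induction l generalizing r with
  | nil => simp [pvS]
  | cons x t ih =>
    simp only [pvGreedyB, List.length_cons, List.cons_append] at h ⊢
    by_cases hb : b < r + pvSize posts_by_id x
    · rw [if_pos hb] at h; omega
    · rw [if_neg hb] at h ⊢
      rw [ih (r + pvSize posts_by_id x) (by omega), pvS_cons]
      have : r + pvSize posts_by_id x + pvS posts_by_id t
           = r + (pvSize posts_by_id x + pvS posts_by_id t) := by ring
      rw [this]
      omega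

-- on a list of length ≤ 2 the B-side drop index is 0
theorem pvSmall_idx (posts_by_id : List (String × List (String × String))) (b : Int)
    (t : List String) (h : t.length ≤ 2) :
    t.length - max (pvGreedyB posts_by_id b t.reverse 0) (min 2 t.length) = 0 := by
  have hle := pvGreedy_le posts_by_id b t.reverse 0
  simp only [List.length_reverse] at hle
  omega

-- the core correspondence: the pop loop run on the true total equals "keep the B-suffix"
theorem pvMain (posts_by_id : List (String × List (String × String))) (b : Int) :
    ∀ (n : Nat) (t : List String), t.length ≤ n →
      pvPopLoopA posts_by_id b t (pvS posts_by_id t)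
        = t.drop (t.length - max (pvGreedyB posts_by_id b t.reverse 0) (min 2 t.length)) := by
  intro n
  induction n with
  | zero =>
    intro t ht
    have ht0 : t = [] := List.eq_nil_of_length_eq_zero (Nat.le_zero.mp ht)
    subst ht0
    simp [pvPopLoopA]
  | succ n ih =>
    intro t ht
    match t with
    | [] =>
      rw [pvSmall_idx posts_by_id b [] (by simp), List.drop_zero]
      simp [pvPopLoopA]
    | [a] =>
      rw [pvSmall_idx posts_by_id b [a] (by simp), List.drop_zero]
      simp [pvPopLoopA]
    | [a, c] =>
      rw [pvSmall_idx posts_by_id b [a, c] (by simp), List.drop_zero]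
      simp [pvPopLoopA]
    | x :: y :: z :: rs =>
      have hlen2 : 2 ≤ (y :: z :: rs).length := by simp
      have hGle : pvGreedyB posts_by_id b (y :: z :: rs).reverse 0 ≤ (y :: z :: rs).length := by
        have := pvGreedy_le posts_by_id b (y :: z :: rs).reverse 0
        simpa using this
      by_cases hbig : b < pvS posts_by_id (x :: y :: z :: rs)
      · -- a trimming step happens
        have harg : pvS posts_by_id (x :: y :: z :: rs) - pvSize posts_by_id x
            = pvS posts_by_id (y :: z :: rs) := by
          rw [pvS_cons]; ring
        have hstep : pvPopLoopA posts_by_id b (x :: y :: z :: rs) (pvS posts_by_id (x :: y :: z :: rs))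
            = pvPopLoopA posts_by_id b (y :: z :: rs) (pvS posts_by_id (y :: z :: rs)) := by
          simp only [pvPopLoopA]
          rw [if_pos hbig, harg]
        rw [hstep, ih (y :: z :: rs) (by simp at ht ⊢; omega)]
        -- greedy ignores x, the oldest element, since the full total is over budget
        have hG : pvGreedyB posts_by_id b (x :: y :: z :: rs).reverse 0
                = pvGreedyB posts_by_id b (y :: z :: rs).reverse 0 := by
          have hrev : (x :: y :: z :: rs).reverse = (y :: z :: rs).reverse ++ [x] := by simp
          rw [hrev]
          rcases lt_or_eq_of_le (pvGreedy_le posts_by_id b (y :: z :: rs).reverse 0) with hlt | heq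
          · exact pvGreedy_append_lt posts_by_id b (y :: z :: rs).reverse [x] 0 hlt
          · rw [pvGreedy_append_full posts_by_id b (y :: z :: rs).reverse [x] 0 heq]
            have hsum : (0 : Int) + pvS posts_by_id (y :: z :: rs).reverse
                = pvS posts_by_id (y :: z :: rs) := by
              rw [pvS_reverse]; ring
            rw [hsum]
            have hx : pvGreedyB posts_by_id b [x] (pvS posts_by_id (y :: z :: rs)) = 0 := by
              simp only [pvGreedyB]
              rw [if_pos (by rw [pvS_cons] at hbig; omega)]
            rw [hx, heq, List.length_reverse]
            omega
        rw [hG]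
        set g := pvGreedyB posts_by_id b (y :: z :: rs).reverse 0 with hg
        have hmin1 : min 2 (y :: z :: rs).length = 2 := by omega
        have hmin2 : min 2 (x :: y :: z :: rs).length = 2 := by simp
        rw [hmin1, hmin2]
        have hidx : (x :: y :: z :: rs).length - max g 2
            = ((y :: z :: rs).length - max g 2) + 1 := by
          simp only [List.length_cons] at hGle ⊢
          omega
        rw [hidx, List.drop_succ_cons]
      · -- already within budget: the loop keeps everything, and so does the greedy scan
        have hA : pvPopLoopA posts_by_id b (x :: y :: z :: rs) (pvS posts_by_id (x :: y :: z :: rs))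
            = x :: y :: z :: rs := by
          simp only [pvPopLoopA]
          rw [if_neg hbig]
        have hG : pvGreedyB posts_by_id b (x :: y :: z :: rs).reverse 0
            = (x :: y :: z :: rs).length := by
          rw [← List.length_reverse]
          exact pvGreedy_all posts_by_id b (x :: y :: z :: rs).reverse 0
            (by rw [pvS_reverse]; omega)
        rw [hA, hG]
        have hidx : (x :: y :: z :: rs).length
            - max (x :: y :: z :: rs).length (min 2 (x :: y :: z :: rs).length) = 0 := by
          omega
        rw [hidx, List.drop_zero]

-- B's output written as a single drop (the 'kept = n' branch is drop 0)
theorem pvAlt_eq_drop (chain_ids : List String) (posts_by_id : List (String × List (String × String)))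
    (b : Int) (h : chain_ids.length ≠ 0) :
    trim_chain_ids_to_char_budget_py_alt chain_ids posts_by_id b
      = chain_ids.drop (chain_ids.length
          - max (pvGreedyB posts_by_id b chain_ids.reverse 0) (min 2 chain_ids.length)) := by
  simp only [trim_chain_ids_to_char_budget_py_alt]
  rw [if_neg h]
  split_ifs with hk
  · rw [hk]
    simp
  · rfl

-- ===== VERDICT (by name: the statement is the Claim_ definition above) =====
theorem trim_chain_ids_to_char_budget_py_spec : Claim_equal_trim_chain_ids_to_char_budget_py := by
  intro chain_ids posts_by_id b _
  unfold Spec_trim_chain_ids_to_char_budget_py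
  by_cases hnil : chain_ids = []
  · subst hnil
    simp [trim_chain_ids_to_char_budget_py, trim_chain_ids_to_char_budget_py_alt]
  · have hn0 : chain_ids.length ≠ 0 := by simpa using hnil
    rw [pvAlt_eq_drop chain_ids posts_by_id b hn0]
    simp only [trim_chain_ids_to_char_budget_py]
    rw [if_neg hnil, pvTotal_eq posts_by_id chain_ids 0, zero_add]
    have hGle : pvGreedyB posts_by_id b chain_ids.reverse 0 ≤ chain_ids.length := by
      have := pvGreedy_le posts_by_id b chain_ids.reverse 0
      simpa using this
    by_cases hfit : pvS posts_by_id chain_ids ≤ b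
    · rw [if_pos hfit]
      have hG : pvGreedyB posts_by_id b chain_ids.reverse 0 = chain_ids.length := by
        rw [← List.length_reverse]
        exact pvGreedy_all posts_by_id b chain_ids.reverse 0 (by rw [pvS_reverse]; omega)
      rw [hG]
      have hidx : chain_ids.length
          - max chain_ids.length (min 2 chain_ids.length) = 0 := by omega
      rw [hidx, List.drop_zero]
    · rw [if_neg hfit]
      exact pvMain posts_by_id b chain_ids.length chain_ids le_rfl
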